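-- pv_equiv track=rewrite | github.com/pdtjy/FD | fastdeploy/metrics/__init__.py | build_buckets
-- ===== SOURCE A (Python) =====
-- from typing import List
--
-- def build_buckets(mantissa_lst: List[int], max_value: int) -> List[int]:
--     """
--     Generate a list of bucket boundaries using a set of mantissas scaled by powers of 10,
--     stopping when the generated value exceeds the specified maximum value.
--     """
--     exponent = 0
--     buckets: List[int] = []
--     while True:
--         for m in mantissa_lst:
--             value = m * 10**exponent
--             if value <= max_value:
--                 buckets.append(value)
--             else:
--                 return buckets
--         exponent += 1
-- ===== SOURCE B (Python) =====
-- from typing import List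
--
-- def build_buckets(mantissa_lst: List[int], max_value: int) -> List[int]:
--     # Two-phase: first locate the cut point (exponent, index) where the scan
--     # would stop, then materialize everything before it with comprehensions.
--     exponent = 0
--     while True:
--         hit = next((i for i, m in enumerate(mantissa_lst) if m * 10 ** exponent > max_value), None)
--         if hit is not None:
--             full = [m * 10 ** e for e in range(exponent) for m in mantissa_lst]
--             return full + [m * 10 ** exponent for m in mantissa_lst[:hit]]
--         exponent += 1
-- ===== Notes on version B (the rewrite author's own statement) =====
-- stated objective: alternative
-- what changed: A builds the result incrementally inside a single scan with an early return; B is two-phase: it first locates the stopping point (first exponent/index whose value exceeds max_value) and then materializes all earlier values with comprehensions over range(exponent) and a list slice.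
import Mathlib
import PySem

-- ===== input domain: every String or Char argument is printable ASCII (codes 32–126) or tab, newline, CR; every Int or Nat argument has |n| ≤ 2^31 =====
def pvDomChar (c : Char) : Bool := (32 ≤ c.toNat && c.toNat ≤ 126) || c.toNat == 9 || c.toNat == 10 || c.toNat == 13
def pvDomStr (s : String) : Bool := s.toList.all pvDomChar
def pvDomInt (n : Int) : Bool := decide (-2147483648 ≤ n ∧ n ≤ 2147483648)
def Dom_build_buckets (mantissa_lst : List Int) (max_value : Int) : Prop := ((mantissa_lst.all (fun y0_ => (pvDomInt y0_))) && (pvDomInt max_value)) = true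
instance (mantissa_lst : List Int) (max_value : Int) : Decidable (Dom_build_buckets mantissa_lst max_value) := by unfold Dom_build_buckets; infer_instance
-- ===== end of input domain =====

-- B differs from A by a two-phase decomposition (locate the stopping point, then build the
-- result by comprehension) instead of A's single accumulating scan; objective: alternative.

-- ===== PORT A =====
-- inner 'for m in mantissa_lst' loop: returns (buckets, returned?) where returned? mirrors the early 'return'
def pvRowA (M : Int) (e : Nat) : List Int → List Int → (List Int × Bool)
  | [], acc => (acc, false)
  | m :: rest, acc =>
      if m * 10 ^ e ≤ M then pvRowA M e rest (acc ++ [m * 10 ^ e]) else (acc, true)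

-- 'while True' loop of A; fuel 64 never runs out on inputs satisfying Dom ∧ Pre (proved below)
def pvLoopA (lst : List Int) (M : Int) : Nat → Nat → List Int → List Int
  | 0, _, acc => acc
  | f + 1, e, acc =>
      let r := pvRowA M e lst acc
      if r.2 then r.1 else pvLoopA lst M f (e + 1) r.1

def build_buckets (mantissa_lst : List Int) (max_value : Int) : List Int :=
  pvLoopA mantissa_lst max_value 64 0 []

-- ===== PORT B =====
-- 'full = [m * 10**e for e in range(exponent) for m in mantissa_lst]'
def pvRows (lst : List Int) (e : Nat) : List Int :=
  (List.range e).flatMap (fun x => lst.map (fun m => m * 10 ^ x))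

-- B's 'while True' loop: find the first overflowing index at this exponent, else recurse
def pvLoopB (lst : List Int) (M : Int) : Nat → Nat → List Int
  | 0, _ => []
  | f + 1, e =>
      match lst.findIdx? (fun m => decide (M < m * 10 ^ e)) with
      | some i => pvRows lst e ++ (lst.take i).map (fun m => m * 10 ^ e)
      | none => pvLoopB lst M f (e + 1)

def build_buckets_alt (mantissa_lst : List Int) (max_value : Int) : List Int :=
  pvLoopB mantissa_lst max_value 64 0

-- ===== PRECONDITION & SPEC =====
-- Pre_ excludes exactly the inputs on which A never returns (infinite loop): A terminates
-- iff some mantissa already exceeds max_value or some mantissa is positive (so scaling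
-- eventually exceeds it); otherwise every generated value stays ≤ max_value forever.
def Pre_build_buckets (mantissa_lst : List Int) (max_value : Int) : Prop :=
  ∃ m ∈ mantissa_lst, max_value < m ∨ 0 < m
instance (mantissa_lst : List Int) (max_value : Int) : Decidable (Pre_build_buckets mantissa_lst max_value) := by unfold Pre_build_buckets; infer_instance

def pvWitness_build_buckets : List Int × Int := ([1, 2, 5], 100)

def Spec_build_buckets (mantissa_lst : List Int) (max_value : Int) (out : List Int) : Prop := out = build_buckets_alt mantissa_lst max_value
instance (mantissa_lst : List Int) (max_value : Int) (out : List Int) : Decidable (Spec_build_buckets mantissa_lst max_value out) := by unfold Spec_build_buckets; infer_instance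

-- ===== CLAIM (what is proved, stated in full; the proofs are below) =====
def Claim_equal_build_buckets : Prop := ∀ (mantissa_lst : List Int) (max_value : Int), Dom_build_buckets mantissa_lst max_value → Pre_build_buckets mantissa_lst max_value → Spec_build_buckets mantissa_lst max_value (build_buckets mantissa_lst max_value)

-- ===== LEMMAS AND PROOFS =====

-- A's inner loop characterised by the first overflowing index
theorem pvRowA_eq (M : Int) (e : Nat) (lst : List Int) : ∀ acc : List Int,
    pvRowA M e lst acc =
      match lst.findIdx? (fun m => decide (M < m * 10 ^ e)) with
      | some i => (acc ++ (lst.take i).map (fun m => m * 10 ^ e), true)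
      | none => (acc ++ lst.map (fun m => m * 10 ^ e), false) := by
  induction lst with
  | nil => intro acc; simp [pvRowA]
  | cons m rest ih =>
      intro acc
      by_cases h : m * 10 ^ e ≤ M
      · have hp : decide (M < m * 10 ^ e) = false := by
          simp only [decide_eq_false_iff_not]; omega
        rw [pvRowA, if_pos h, ih, List.findIdx?_cons]
        simp only [hp]
        cases hr : rest.findIdx? (fun m => decide (M < m * 10 ^ e)) <;> simp
      · have hp : decide (M < m * 10 ^ e) = true := by
          simp only [decide_eq_true_eq]; omega
        rw [pvRowA, if_neg h, List.findIdx?_cons]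
        simp only [hp]
        simp

theorem pvRows_succ (lst : List Int) (e : Nat) :
    pvRows lst (e + 1) = pvRows lst e ++ lst.map (fun m => m * 10 ^ e) := by
  simp [pvRows, List.range_succ]

theorem pvLoop_eq (lst : List Int) (M : Int) : ∀ (fuel e : Nat),
    (∃ k, k < fuel ∧ (lst.findIdx? (fun m => decide (M < m * 10 ^ (e + k)))).isSome) →
    pvLoopA lst M fuel e (pvRows lst e) = pvLoopB lst M fuel e := by
  intro fuel
  induction fuel with
  | zero => intro e ⟨k, hk, _⟩; omega
  | succ f ih =>
      intro e ⟨k, hk, hs⟩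
      rw [pvLoopA, pvLoopB, pvRowA_eq]
      cases h : lst.findIdx? (fun m => decide (M < m * 10 ^ e)) with
      | some i => simp
      | none =>
          rw [← pvRows_succ]
          apply ih
          cases k with
          | zero => rw [show e + 0 = e by rfl, h] at hs; simp at hs
          | succ k' =>
              exact ⟨k', by omega, by rw [show e + 1 + k' = e + (k' + 1) by omega]; exact hs⟩

theorem findIdx?_isSome_of_mem {lst : List Int} {M : Int} {e : Nat} {m : Int}
    (hm : m ∈ lst) (h : M < m * 10 ^ e) :
    (lst.findIdx? (fun m => decide (M < m * 10 ^ e))).isSome := by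
  rw [List.findIdx?_isSome, List.any_eq_true]
  exact ⟨m, hm, by simpa using h⟩

-- ===== VERDICT (by name: the statement is the Claim_ definition above) =====
theorem build_buckets_spec : Claim_equal_build_buckets := by
  intro lst M hdom hpre
  unfold Spec_build_buckets build_buckets build_buckets_alt
  have hrows0 : pvRows lst 0 = [] := by simp [pvRows]
  rw [← hrows0]
  apply pvLoop_eq
  obtain ⟨m, hm, hcase⟩ := hpre
  rcases hcase with h | h
  · exact ⟨0, by omega, findIdx?_isSome_of_mem hm (by simpa using h)⟩
  · have hM : M ≤ 2147483648 := by
      unfold Dom_build_buckets at hdom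
      simp [pvDomInt] at hdom
      exact hdom.2.2
    refine ⟨31, by omega, findIdx?_isSome_of_mem hm ?_⟩
    have h1 : (1 : Int) * 10 ^ (0 + 31) ≤ m * 10 ^ (0 + 31) := by
      apply mul_le_mul_of_nonneg_right (by omega) (by positivity)
    have h2 : (2147483648 : Int) < 1 * 10 ^ (0 + 31) := by norm_num
    omega
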